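-- pv_equiv track=rewrite | github.com/mhalle/atrun | src/atrun/publish.py | _name_version_from_dist_filename
-- ===== SOURCE A (Python) =====
-- def _name_version_from_dist_filename(filename: str) -> tuple[str, str]:
--     """Extract (package_name, version) from a distribution filename.
--
--     Supports wheel (.whl), sdist (.tar.gz), and npm tarball (.tgz) naming.
--     For example:
--       - 'atrun-0.5.0-py3-none-any.whl' -> ('atrun', '0.5.0')
--       - 'cowsay-1.6.0.tgz' -> ('cowsay', '1.6.0')
--     """
--     if filename.endswith(".whl"):
--         stem = filename[:-4]
--     elif filename.endswith(".tar.gz"):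
--         stem = filename[:-7]
--     elif "." in filename:
--         stem = filename.rsplit(".", 1)[0]
--     else:
--         stem = filename
--     parts = stem.split("-")
--     if len(parts) < 2:
--         raise SystemExit(f"Cannot parse distribution filename: {filename}")
--     # Wheels use underscores in name (PEP 427), so simple split works.
--     # For sdists/tarballs, find the version boundary: first part that starts
--     # with a digit or 'v' followed by a digit (e.g. v1.2.3).
--     if not filename.endswith(".whl"):
--         for i in range(1, len(parts)):
--             p = parts[i]
--             if p and (p[0].isdigit() or (p[0] == "v" and len(p) > 1 and p[1].isdigit())):
--                 return "-".join(parts[:i]), "-".join(parts[i:])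
--     return parts[0], parts[1]
-- ===== SOURCE B (Python) =====
-- def _starts_version_chars(tail: str) -> bool:
--     # version starts right here: a digit, or 'v' followed by a digit
--     return tail[:1].isdigit() or (tail[:1] == "v" and tail[1:2].isdigit())
--
--
-- def _name_version_from_dist_filename(filename: str) -> tuple[str, str]:
--     """Extract (package_name, version) from a distribution filename.
--
--     Character-level scan: no split into a parts list and no joins of
--     slices -- walk the stem once and cut it at the first '-' that is
--     followed by a version-looking character.
--     """
--     if filename.endswith(".whl"):
--         stem = filename[:-4]
--     elif filename.endswith(".tar.gz"):
--         stem = filename[:-7]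
--     elif "." in filename:
--         stem = filename.rsplit(".", 1)[0]
--     else:
--         stem = filename
--     name, dash, rest = stem.partition("-")
--     if not dash:
--         raise SystemExit(f"Cannot parse distribution filename: {filename}")
--     if not filename.endswith(".whl"):
--         seen, todo = "", stem
--         while todo:
--             ch, tail = todo[0], todo[1:]
--             if ch == "-" and _starts_version_chars(tail):
--                 return seen, tail
--             seen, todo = seen + ch, tail
--     return name, rest.partition("-")[0]
-- ===== Notes on version B (the rewrite author's own statement) =====
-- stated objective: alternative
-- what changed: A splits the stem into a parts list and runs an index loop over range(1, len(parts)) re-joining prefix/suffix slices of that list; B never builds a parts list for the boundary search: it scans the stem's characters once and cuts at the first dash followed by a digit (or a v plus digit), using partition() for the fall-through pair.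
import Mathlib
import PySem

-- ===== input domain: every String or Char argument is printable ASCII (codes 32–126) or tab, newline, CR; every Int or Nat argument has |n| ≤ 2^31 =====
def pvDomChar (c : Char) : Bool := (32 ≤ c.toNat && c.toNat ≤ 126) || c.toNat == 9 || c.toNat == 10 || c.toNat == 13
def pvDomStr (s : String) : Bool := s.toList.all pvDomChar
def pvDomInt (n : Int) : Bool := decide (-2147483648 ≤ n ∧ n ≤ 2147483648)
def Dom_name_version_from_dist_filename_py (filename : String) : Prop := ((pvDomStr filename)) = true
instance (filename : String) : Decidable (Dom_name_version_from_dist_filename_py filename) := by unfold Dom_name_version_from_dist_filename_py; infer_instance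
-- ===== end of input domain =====

-- B replaces A's parts-list machinery (split on '-', index loop over parts, joins of
-- prefix/suffix slices) by a character-level scan of the stem that cuts it at the first
-- '-' followed by a version-looking character; objective: alternative (different data
-- traversal, similar cost). Return-value equivalence; neither version mutates its argument.

-- shared stem computation (the suffix-stripping stage, identical in both Pythons):
-- filename[:-4] / filename[:-7] / rsplit(".", 1)[0] (= the prefix before the LAST '.', exact since '.' ∈ s) / filename
def pvStem (s : List Char) : List Char :=
  if PySem.Chars.endswith s ['.', 'w', 'h', 'l'] then PySem.List.slice s none (some (-4))
  else if PySem.Chars.endswith s ['.', 't', 'a', 'r', '.', 'g', 'z'] then PySem.List.slice s none (some (-7))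
  else if PySem.Chars.isIn ['.'] s then s.take (PySem.Chars.rfind s ['.']).toNat
  else s

-- ===== PORT A =====
-- p and (p[0].isdigit() or (p[0] == "v" and len(p) > 1 and p[1].isdigit())), A's inline test
def pvVerA (p : List Char) : Bool :=
  match p with
  | [] => false
  | [c] => PySem.Chars.isdigit c
  | c :: d :: _ => PySem.Chars.isdigit c || (c == 'v' && PySem.Chars.isdigit d)

-- for i in range(1, len(parts)): … return "-".join(parts[:i]), "-".join(parts[i:])
def pvLoopA (parts : List (List Char)) (i : Nat) : Option (List Char × List Char) :=
  if h : i < parts.length then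
    if pvVerA parts[i] then
      some (PySem.Chars.join ['-'] (parts.take i), PySem.Chars.join ['-'] (parts.drop i))
    else pvLoopA parts (i + 1)
  else none
termination_by parts.length - i

def name_version_from_dist_filename_py (filename : String) : String × String :=
  let s := filename.toList
  let stem := pvStem s
  let parts := PySem.Chars.splitOn stem ['-']
  if parts.length < 2 then ("", "")  -- raise SystemExit: excluded by Pre_
  else if !PySem.Chars.endswith s ['.', 'w', 'h', 'l'] then
    match pvLoopA parts 1 with
    | some (n, v) => (String.ofList n, String.ofList v)
    | none => (String.ofList (parts.getD 0 []), String.ofList (parts.getD 1 []))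
  else (String.ofList (parts.getD 0 []), String.ofList (parts.getD 1 []))

-- ===== PORT B =====
-- tail[:1].isdigit() or (tail[:1] == "v" and tail[1:2].isdigit())  (nonnegative slice bounds: take/drop are exact)
def pvStartsVerChars (tail : List Char) : Bool :=
  (tail.take 1).any PySem.Chars.isdigit ||
  (tail.take 1 == ['v'] && ((tail.drop 1).take 1).any PySem.Chars.isdigit)

-- B's while loop: slide over the stem's characters, seen = stem[:j], todo = stem[j:]
def pvScanB (seen todo : List Char) : Option (List Char × List Char) :=
  match todo with
  | [] => none
  | ch :: tail =>
    if ch == '-' && pvStartsVerChars tail then some (seen, tail)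
    else pvScanB (seen ++ [ch]) tail

def name_version_from_dist_filename_py_alt (filename : String) : String × String :=
  let s := filename.toList
  let stem := pvStem s
  -- name, dash, rest = stem.partition("-")  (single-character separator: exact as takeWhile / dropWhile-then-drop)
  let name := stem.takeWhile (· != '-')
  let rest := (stem.dropWhile (· != '-')).drop 1
  if !PySem.Chars.isIn ['-'] stem then ("", "")  -- 'if not dash: raise SystemExit': excluded by Pre_
  else if !PySem.Chars.endswith s ['.', 'w', 'h', 'l'] then
    match pvScanB [] stem with
    | some (n, v) => (String.ofList n, String.ofList v)
    | none => (String.ofList name, String.ofList (rest.takeWhile (· != '-')))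
  else (String.ofList name, String.ofList (rest.takeWhile (· != '-')))

-- ===== PRECONDITION & SPEC =====
-- Pre_ excludes exactly the filenames whose stem contains no '-' (fewer than two
-- dash-separated parts): there BOTH Pythons raise SystemExit.
def Pre_name_version_from_dist_filename_py (filename : String) : Prop :=
  PySem.Chars.isIn ['-'] (pvStem filename.toList) = true
instance (filename : String) : Decidable (Pre_name_version_from_dist_filename_py filename) := by
  unfold Pre_name_version_from_dist_filename_py; infer_instance

def pvWitness_name_version_from_dist_filename_py : String := "atrun-0.5.0.tar.gz"

def Spec_name_version_from_dist_filename_py (filename : String) (out : String × String) : Prop :=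
  out = name_version_from_dist_filename_py_alt filename
instance (filename : String) (out : String × String) : Decidable (Spec_name_version_from_dist_filename_py filename out) := by
  unfold Spec_name_version_from_dist_filename_py; infer_instance

-- ===== CLAIM (what is proved, stated in full; the proofs are below) =====
def Claim_equal_name_version_from_dist_filename_py : Prop :=
  ∀ (filename : String), Dom_name_version_from_dist_filename_py filename →
    Pre_name_version_from_dist_filename_py filename →
    Spec_name_version_from_dist_filename_py filename (name_version_from_dist_filename_py filename)

-- ===== LEMMAS AND PROOFS =====

-- proof-only accumulator form of A's index loop (name so far, remaining parts)
def pvGo (name : List Char) (ps : List (List Char)) : Option (List Char × List Char) :=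
  match ps with
  | [] => none
  | p :: rs =>
    if pvVerA p then some (name, PySem.Chars.join ['-'] (p :: rs))
    else pvGo (name ++ ['-'] ++ p) rs

theorem pvGoSplitEq (c : Char) : ∀ (fuel : Nat) (l cur : List Char) (acc : List (List Char)),
    l.length < fuel →
    PySem.Chars.splitOn.go [c] fuel l cur acc
      = acc.reverse ++ (l.splitOnP (· == c)).modifyHead (cur.reverse ++ ·) := by
  intro fuel
  induction fuel with
  | zero => intro l cur acc h; omega
  | succ f ih =>
    intro l cur acc h
    cases l with
    | nil => simp [PySem.Chars.splitOn.go, List.splitOnP_nil]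
    | cons a rest =>
      rw [PySem.Chars.splitOn.go]
      by_cases hc : a = c
      · subst hc
        simp only [List.isPrefixOf, BEq.rfl, Bool.and_self, List.isPrefixOf_nil_left, if_true,
          List.splitOnP_cons]
        rw [ih _ _ _ (by simpa using Nat.lt_of_succ_lt_succ h)]
        simp only [List.splitOnP_cons, BEq.rfl, if_true, List.reverse_cons, List.reverse_nil,
          List.nil_append, List.append_assoc, List.singleton_append, List.nil_append]
        cases hsp : rest.splitOnP (· == a) with
        | nil => simp [hsp]
        | cons b bs => simp [hsp, List.modifyHead]
      · have hpf : [c].isPrefixOf (a :: rest) = false := by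
          simp [List.isPrefixOf, Ne.symm hc]
        simp only [hpf, Bool.false_eq_true, if_false]
        rw [ih _ _ _ (by simpa using Nat.lt_of_succ_lt_succ h)]
        simp only [List.splitOnP_cons, hc, beq_iff_eq, if_neg hc]
        cases hsp : rest.splitOnP (· == c) with
        | nil => simp [hsp]
        | cons b bs => simp [hsp, List.modifyHead]

theorem pvSplitOn_eq (c : Char) (s : List Char) :
    PySem.Chars.splitOn s [c] = s.splitOnP (· == c) := by
  rw [PySem.Chars.splitOn, pvGoSplitEq c (s.length + 1) s [] [] (by omega)]
  cases h : s.splitOnP (· == c) with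
  | nil => simp
  | cons b bs => simp [List.modifyHead]

theorem pvSp_len_pos (s : List Char) : 1 ≤ (s.splitOnP (· == '-')).length := by
  induction s with
  | nil => simp [List.splitOnP_nil]
  | cons a t ih =>
    rw [List.splitOnP_cons]
    split_ifs with h
    · simp
    · simpa [List.length_modifyHead] using ih

theorem pvSp_not_mem (s : List Char) (h : '-' ∉ s) : s.splitOnP (· == '-') = [s] := by
  induction s with
  | nil => simp [List.splitOnP_nil]
  | cons a t ih =>
    have ha : ¬ a = '-' := fun hc => h (hc ▸ List.mem_cons_self)
    rw [List.splitOnP_cons, if_neg (by simpa using ha),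
      ih (fun hm => h (List.mem_cons_of_mem a hm))]
    rfl

theorem pvSp_mem (s : List Char) (h : '-' ∈ s) :
    s.splitOnP (· == '-')
      = s.takeWhile (· != '-') :: ((s.dropWhile (· != '-')).drop 1).splitOnP (· == '-') := by
  induction s with
  | nil => cases h
  | cons a t ih =>
    by_cases ha : a = '-'
    · subst ha
      simp [List.splitOnP_cons, List.takeWhile, List.dropWhile]
    · have ht : '-' ∈ t := by cases List.mem_cons.mp h with
        | inl h' => exact absurd h'.symm ha
        | inr h' => exact h'
      have hb : (a != '-') = true := by simp [ha]
      rw [List.splitOnP_cons, if_neg (by simpa using ha), ih ht]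
      simp [List.takeWhile, List.dropWhile, hb, List.modifyHead]

theorem pvDropWhile_mem (s : List Char) (h : '-' ∈ s) :
    s.dropWhile (· != '-') = '-' :: (s.dropWhile (· != '-')).drop 1 := by
  induction s with
  | nil => cases h
  | cons a t ih =>
    by_cases ha : a = '-'
    · subst ha; simp [List.dropWhile]
    · have ht : '-' ∈ t := by cases List.mem_cons.mp h with
        | inl h' => exact absurd h'.symm ha
        | inr h' => exact h'
      have hb : (a != '-') = true := by simp [ha]
      simpa [List.dropWhile, hb] using ih ht

theorem pvSp_head (s : List Char) :
    (s.splitOnP (· == '-')).getD 0 [] = s.takeWhile (· != '-') := by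
  by_cases h : '-' ∈ s
  · rw [pvSp_mem s h]; rfl
  · rw [pvSp_not_mem s h, List.getD_cons_zero,
      (List.takeWhile_eq_self_iff).mpr (fun x hx => by
        simp only [bne_iff_ne, ne_eq]
        intro hc; subst hc; exact h hx)]

theorem pvSp_len2 (s : List Char) (h : '-' ∈ s) : 2 ≤ (s.splitOnP (· == '-')).length := by
  rw [pvSp_mem s h]
  have := pvSp_len_pos ((s.dropWhile (· != '-')).drop 1)
  simpa using this

theorem pvJoin_modifyHead (a : Char) (ps : List (List Char)) (h : ps ≠ []) :
    PySem.Chars.join ['-'] (ps.modifyHead (a :: ·)) = a :: PySem.Chars.join ['-'] ps := by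
  cases ps with
  | nil => exact absurd rfl h
  | cons b bs =>
    cases bs with
    | nil => simp [List.modifyHead, PySem.Chars.join_singleton]
    | cons c cs => simp [List.modifyHead, PySem.Chars.join_cons_cons]

theorem pvJoin_sp (s : List Char) : PySem.Chars.join ['-'] (s.splitOnP (· == '-')) = s := by
  induction s with
  | nil => simp [List.splitOnP_nil, PySem.Chars.join_singleton]
  | cons a t ih =>
    rw [List.splitOnP_cons]
    by_cases ha : a = '-'
    · subst ha
      rw [if_pos (by simp)]
      cases hsp : t.splitOnP (· == '-') with
      | nil => exact absurd hsp (by have := pvSp_len_pos t; intro hc; rw [hc] at this; simp at this)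
      | cons b bs =>
        rw [PySem.Chars.join_cons_cons]
        rw [hsp] at ih
        simp [ih]
    · rw [if_neg (by simpa using ha), pvJoin_modifyHead a _ (by
        have := pvSp_len_pos t; intro hc; rw [hc] at this; simp at this), ih]

theorem pvVer_eq (rest : List Char) : pvVerA (rest.takeWhile (· != '-')) = pvStartsVerChars rest := by
  cases rest with
  | nil => rfl
  | cons c t =>
    by_cases hc : c = '-'
    · subst hc
      have hdig : PySem.Chars.isdigit '-' = false := by decide
      simp [List.takeWhile, pvVerA, pvStartsVerChars, hdig]
    · have hb : (c != '-') = true := by simp [hc]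
      cases t with
      | nil =>
        simp [List.takeWhile, hb, pvVerA, pvStartsVerChars]
      | cons d t' =>
        by_cases hd : d = '-'
        · subst hd
          have hdig : PySem.Chars.isdigit '-' = false := by decide
          simp [List.takeWhile, hb, pvVerA, pvStartsVerChars, hdig]
        · have hb2 : (d != '-') = true := by simp [hd]
          simp [List.takeWhile, hb, hb2, pvVerA, pvStartsVerChars]


theorem pvScan_skip : ∀ (p : List Char), (∀ x ∈ p, (x == '-') = false) →
    ∀ (a tl : List Char), pvScanB a (p ++ tl) = pvScanB (a ++ p) tl := by
  intro p
  induction p with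
  | nil => intro _ a tl; simp
  | cons x p' ih =>
    intro h a tl
    have hx : (x == '-') = false := h x List.mem_cons_self
    rw [List.cons_append, pvScanB]
    simp only [hx, Bool.false_and, Bool.false_eq_true, if_false]
    rw [ih (fun y hy => h y (List.mem_cons_of_mem x hy)) (a ++ [x]) tl]
    simp


-- "-".join(l ++ [y]) = "-".join(l) ++ sep ++ y for nonempty l
theorem pvJoin_append_singleton (sep y : List Char) :
    ∀ (l : List (List Char)), l ≠ [] →
      PySem.Chars.join sep (l ++ [y]) = PySem.Chars.join sep l ++ sep ++ y := by
  intro l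
  induction l with
  | nil => intro h; exact absurd rfl h
  | cons a t ih =>
    intro _
    cases t with
    | nil => simp [PySem.Chars.join_cons_cons, PySem.Chars.join_singleton]
    | cons b t' =>
      have := ih (by simp)
      simp only [List.cons_append, PySem.Chars.join_cons_cons] at *
      rw [this]
      simp [List.append_assoc]

-- A's index scan from i equals the accumulator form on the remaining parts
theorem pvLoopA_eq_pvGo (parts : List (List Char)) :
    ∀ (n i : Nat), parts.length - i = n → 1 ≤ i → i ≤ parts.length →
      pvLoopA parts i = pvGo (PySem.Chars.join ['-'] (parts.take i)) (parts.drop i) := by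
  intro n
  induction n with
  | zero =>
    intro i hn _ hle
    have hi : i = parts.length := by omega
    rw [pvLoopA]
    simp [hi, pvGo]
  | succ n ih =>
    intro i hn h1 _
    have hlt : i < parts.length := by omega
    have hdrop : parts.drop i = parts[i] :: parts.drop (i + 1) :=
      List.drop_eq_getElem_cons hlt
    rw [pvLoopA, dif_pos hlt, hdrop, pvGo]
    by_cases hv : pvVerA parts[i]
    · simp [hv, ← hdrop]
    · simp only [hv, if_false, Bool.false_eq_true]
      rw [ih (i + 1) (by omega) (by omega) (by omega)]
      congr 1
      have htake : parts.take (i + 1) = parts.take i ++ [parts[i]] := by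
        rw [List.take_add_one]
        simp [hlt]
      rw [htake, pvJoin_append_singleton]
      intro hc
      have : (parts.take i).length = i := by simp [Nat.min_eq_left (le_of_lt hlt)]
      rw [hc] at this
      simp at this
      omega

-- the accumulator form over the split equals B's character scan after the first dash
theorem pvGo_eq_scan : ∀ (n : Nat) (rest acc : List Char), rest.length ≤ n →
    pvGo acc (rest.splitOnP (· == '-')) = pvScanB acc ('-' :: rest) := by
  intro n
  induction n with
  | zero =>
    intro rest acc h
    have : rest = [] := List.length_eq_zero_iff.mp (Nat.le_zero.mp h)
    subst this
    simp [List.splitOnP_nil, pvGo, pvVerA, pvScanB, pvStartsVerChars]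
  | succ n ih =>
    intro rest acc h
    have htw : ∀ x ∈ rest.takeWhile (· != '-'), (x == '-') = false := by
      intro x hx
      have := List.mem_takeWhile_imp hx
      simpa using this
    rw [pvScanB]
    simp only [BEq.rfl, Bool.true_and]
    by_cases hm : '-' ∈ rest
    · rw [pvSp_mem rest hm, pvGo]
      rw [pvVer_eq rest]
      by_cases hv : pvStartsVerChars rest
      · rw [if_pos hv, if_pos hv, ← pvSp_mem rest hm, pvJoin_sp rest]
      · rw [if_neg (by simp [hv]), if_neg (by simp [hv])]
        have hdec : rest = rest.takeWhile (· != '-') ++ ('-' :: (rest.dropWhile (· != '-')).drop 1) := by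
          conv_lhs => rw [← List.takeWhile_append_dropWhile (p := (· != '-')) (l := rest)]
          rw [← pvDropWhile_mem rest hm]
        have hlen : ((rest.dropWhile (· != '-')).drop 1).length ≤ n := by
          have := congrArg List.length hdec
          simp only [List.length_append, List.length_cons] at this
          omega
        conv_rhs => rw [hdec]
        rw [pvScan_skip _ htw (acc ++ ['-']) _, ← ih _ _ hlen]
    · rw [pvSp_not_mem rest hm, pvGo]
      have htw' : rest.takeWhile (· != '-') = rest :=
        List.takeWhile_eq_self_iff.mpr (fun x hx => by
          simp only [bne_iff_ne, ne_eq]; intro hc; subst hc; exact hm hx)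
      rw [← htw', pvVer_eq rest, htw']
      by_cases hv : pvStartsVerChars rest
      · rw [if_pos hv, if_pos hv, PySem.Chars.join_singleton]
      · rw [if_neg (by simp [hv]), if_neg (by simp [hv]), pvGo]
        have : ∀ x ∈ rest, (x == '-') = false := fun x hx => by
          simp only [beq_eq_false_iff_ne, ne_eq]; intro hc; subst hc; exact hm hx
        rw [show rest = rest ++ [] by simp] at *
        rw [pvScan_skip rest (by simpa using this) (acc ++ ['-']) []]
        rfl

-- ===== VERDICT (by name: the statement is the Claim_ definition above) =====
theorem name_version_from_dist_filename_py_spec : Claim_equal_name_version_from_dist_filename_py := by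
  intro filename _ hpre
  unfold Pre_name_version_from_dist_filename_py at hpre
  unfold Spec_name_version_from_dist_filename_py
  have hm : '-' ∈ pvStem filename.toList :=
    (List.singleton_infix_iff '-' _).mp
      ((PySem.Chars.isIn_iff_infix ['-'] (pvStem filename.toList)).mp hpre)
  have h2 := pvSp_len2 _ hm
  have hparts := pvSp_mem _ hm
  have hdw := pvDropWhile_mem _ hm
  have hsplit := pvSplitOn_eq '-' (pvStem filename.toList)
  simp only [name_version_from_dist_filename_py, name_version_from_dist_filename_py_alt]
  rw [hsplit, hpre]
  rw [if_neg (by omega)]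
  simp only [Bool.not_true, Bool.false_eq_true, if_false]
  -- both second components of the fall-through tuple agree
  have hgetD1 : ((pvStem filename.toList).splitOnP (· == '-')).getD 1 []
      = (((pvStem filename.toList).dropWhile (· != '-')).drop 1).takeWhile (· != '-') := by
    rw [hparts, List.getD_cons_succ, pvSp_head]
  have hgetD0 : ((pvStem filename.toList).splitOnP (· == '-')).getD 0 []
      = (pvStem filename.toList).takeWhile (· != '-') := pvSp_head _
  by_cases hw : PySem.Chars.endswith filename.toList ['.', 'w', 'h', 'l']
  · simp only [hw, Bool.not_true, Bool.false_eq_true, if_false, hgetD0, hgetD1]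
  · simp only [hw, Bool.not_false, if_true]
    -- A's loop equals B's scan
    have htw : ∀ x ∈ (pvStem filename.toList).takeWhile (· != '-'), (x == '-') = false := by
      intro x hx
      have := List.mem_takeWhile_imp hx
      simpa using this
    have hdec : pvStem filename.toList
        = (pvStem filename.toList).takeWhile (· != '-')
          ++ ('-' :: ((pvStem filename.toList).dropWhile (· != '-')).drop 1) := by
      conv_lhs => rw [← List.takeWhile_append_dropWhile (p := (· != '-')) (l := pvStem filename.toList)]
      rw [← hdw]
    have hloop : pvLoopA ((pvStem filename.toList).splitOnP (· == '-')) 1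
        = pvScanB [] (pvStem filename.toList) := by
      rw [pvLoopA_eq_pvGo _ (((pvStem filename.toList).splitOnP (· == '-')).length - 1) 1 rfl
        (le_refl 1) (by omega)]
      rw [hparts]
      simp only [List.take_succ_cons, List.take_zero, List.drop_succ_cons, List.drop_zero,
        PySem.Chars.join_singleton]
      rw [pvGo_eq_scan _ _ _ (le_refl _)]
      conv_rhs => rw [hdec]
      rw [pvScan_skip _ htw [] _]
      simp
    rw [hloop]
    cases pvScanB [] (pvStem filename.toList) with
    | none => simp only [hgetD0, hgetD1]
    | some nv => rfl
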